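-- pv_equiv track=rewrite | github.com/Lilsofie/VirusTotal | testyaml.py | find_path_template
-- ===== SOURCE A (Python) =====
-- def find_path_template(spec, target_path):
--     for path_template in spec['paths']:
--         if '{' in path_template:
--             template_parts = path_template.split('/')
--             target_parts = target_path.split('/')
--             if len(template_parts) == len(target_parts):
--                 match = all(tp.startswith('{') or tp == tp2 for tp, tp2 in zip(template_parts, target_parts))
--                 if match:
--                     return path_template
--     return None
-- ===== SOURCE B (Python) =====
-- def _match(tps, pps):
--     # simultaneous structural recursion over the two segment lists:
--     # no length computation, no zip
--     if not tps or not pps: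
--         return not tps and not pps
--     return (tps[0].startswith('{') or tps[0] == pps[0]) and _match(tps[1:], pps[1:])
--
--
-- def find_path_template(spec, target_path):
--     target_parts = target_path.split('/')
--     for path_template in spec['paths']:
--         if '{' in path_template and _match(path_template.split('/'), target_parts):
--             return path_template
--     return None
-- ===== Notes on version B (the rewrite author's own statement) =====
-- stated objective: simpler
-- what changed: Replaces A's length-check + zip + all() segment comparison with a single recursive two-list matcher (length equality is implicit in the recursion) and hoists the target split out of the loop.
import Mathlib
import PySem

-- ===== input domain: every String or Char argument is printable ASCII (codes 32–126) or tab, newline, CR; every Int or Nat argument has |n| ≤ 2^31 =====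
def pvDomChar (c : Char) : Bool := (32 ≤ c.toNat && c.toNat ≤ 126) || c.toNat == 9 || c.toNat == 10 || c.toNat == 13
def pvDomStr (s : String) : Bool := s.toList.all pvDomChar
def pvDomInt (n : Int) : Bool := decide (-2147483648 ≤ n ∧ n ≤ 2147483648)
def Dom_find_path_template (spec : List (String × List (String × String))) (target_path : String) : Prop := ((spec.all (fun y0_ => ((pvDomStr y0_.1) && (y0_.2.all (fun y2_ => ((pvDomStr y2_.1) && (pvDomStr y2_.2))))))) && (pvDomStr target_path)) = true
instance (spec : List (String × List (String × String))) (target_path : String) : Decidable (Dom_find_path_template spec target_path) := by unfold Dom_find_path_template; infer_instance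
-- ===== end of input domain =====

-- B replaces A's length-check + zip + all segment comparison by one recursive two-list matcher; simpler, same cost.
-- s.split("/") with the nonempty literal separator "/": split? is always `some` there
def pySplitSlash (s : String) : List String := (PySem.Str.split? s "/").getD []

-- ===== PORT A =====
-- the 'for path_template in spec["paths"]' loop (iterates the inner dict's keys; a match
-- depends only on the key, so iterating the raw key list is exact)
def fptLoopA (paths : List String) (target_path : String) : Option String :=
  match paths with
  | [] => none
  | pt :: rest =>
    if PySem.Str.isIn "{" pt then
      let template_parts := pySplitSlash pt
      let target_parts := pySplitSlash target_path
      if template_parts.length == target_parts.length then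
        let mtch := (template_parts.zip target_parts).all
          (fun p => PySem.Str.startswith p.1 "{" || p.1 == p.2)
        if mtch then some pt else fptLoopA rest target_path
      else fptLoopA rest target_path
    else fptLoopA rest target_path

def find_path_template (spec : List (String × List (String × String))) (target_path : String) : Option String :=
  match spec.find? (fun p => p.1 == "paths") with
  | none => none  -- KeyError in Python; excluded by Pre_
  | some (_, d) => fptLoopA (d.map Prod.fst) target_path

-- ===== PORT B =====
-- _match: simultaneous recursion over the two segment lists
def fptMatch : List String → List String → Bool
  | [], [] => true
  | [], _ :: _ => false
  | _ :: _, [] => false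
  | t :: ts, p :: ps => (PySem.Str.startswith t "{" || t == p) && fptMatch ts ps

def fptLoopB (paths : List String) (target_parts : List String) : Option String :=
  match paths with
  | [] => none
  | pt :: rest =>
    if PySem.Str.isIn "{" pt && fptMatch (pySplitSlash pt) target_parts then
      some pt
    else fptLoopB rest target_parts

def find_path_template_alt (spec : List (String × List (String × String))) (target_path : String) : Option String :=
  let target_parts := pySplitSlash target_path
  match spec.find? (fun p => p.1 == "paths") with
  | none => none  -- KeyError in Python; excluded by Pre_
  | some (_, d) => fptLoopB (d.map Prod.fst) target_parts

-- ===== PRECONDITION & SPEC =====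
-- A raises KeyError when spec lacks the key "paths"; Pre_ requires that key to be present.
def Pre_find_path_template (spec : List (String × List (String × String))) (_target_path : String) : Prop :=
  "paths" ∈ spec.map Prod.fst
instance (spec : List (String × List (String × String))) (target_path : String) : Decidable (Pre_find_path_template spec target_path) := by unfold Pre_find_path_template; infer_instance
def pvWitness_find_path_template : (List (String × List (String × String))) × String :=
  ([("paths", [("/a/{id}", "x")])], "/a/7")
def Spec_find_path_template (spec : List (String × List (String × String))) (target_path : String) (out : Option String) : Prop := out = find_path_template_alt spec target_path
instance (spec : List (String × List (String × String))) (target_path : String) (out : Option String) : Decidable (Spec_find_path_template spec target_path out) := by unfold Spec_find_path_template; infer_instance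

-- ===== CLAIM (what is proved, stated in full; the proofs are below) =====
def Claim_equal_find_path_template : Prop := ∀ (spec : List (String × List (String × String))) (target_path : String), Dom_find_path_template spec target_path → Pre_find_path_template spec target_path → Spec_find_path_template spec target_path (find_path_template spec target_path)

-- ===== LEMMAS AND PROOFS =====
-- B's recursive matcher computes A's length test plus zipped all-check
theorem fptMatch_eq (ts ps : List String) :
    fptMatch ts ps =
      ((ts.length == ps.length) &&
        (ts.zip ps).all (fun p => PySem.Str.startswith p.1 "{" || p.1 == p.2)) := by
  induction ts generalizing ps with
  | nil => cases ps <;> simp [fptMatch]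
  | cons t ts ih =>
    cases ps with
    | nil => simp [fptMatch]
    | cons p ps =>
      simp only [fptMatch, ih, List.length_cons, List.zip_cons_cons, List.all_cons]
      cases h : (PySem.Str.startswith t "{" || t == p) <;> simp [h]

theorem fptLoop_eq (paths : List String) (target_path : String) :
    fptLoopA paths target_path = fptLoopB paths (pySplitSlash target_path) := by
  induction paths with
  | nil => rfl
  | cons pt rest ih =>
    simp only [fptLoopA, fptLoopB, fptMatch_eq, ih]
    cases h1 : PySem.Str.isIn "{" pt <;>
      cases h2 : ((pySplitSlash pt).length == (pySplitSlash target_path).length) <;>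
        cases h3 : (((pySplitSlash pt).zip (pySplitSlash target_path)).all
            (fun p => PySem.Str.startswith p.1 "{" || p.1 == p.2)) <;>
          simp only [h1, h2, h3, Bool.false_and, Bool.true_and, Bool.and_false, Bool.and_true,
            Bool.false_eq_true, ite_false, ite_true]

-- ===== VERDICT (by name: the statement is the Claim_ definition above) =====
theorem find_path_template_spec : Claim_equal_find_path_template := by
  intro spec target_path _ _
  unfold Spec_find_path_template find_path_template find_path_template_alt
  cases spec.find? (fun p => p.1 == "paths") with
  | none => rfl
  | some pd => exact fptLoop_eq _ _
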